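-- pv_equiv track=rewrite | github.com/finnsrnmarx-cloud/CLI | find_missing_d_pairs.py | king_neighbors
-- ===== SOURCE A (Python) =====
-- def king_neighbors(r, c):
--     for dr in (-1, 0, 1):
--         for dc in (-1, 0, 1):
--             if dr == dc == 0:
--                 continue
--             nr, nc = r + dr, c + dc
--             if 1 <= nr <= 14 and 1 <= nc <= 14:
--                 yield nr, nc
-- ===== SOURCE B (Python) =====
-- def king_neighbors(r, c):
--     for nr in range(1, 15):
--         for nc in range(1, 15):
--             if max(abs(nr - r), abs(nc - c)) == 1:
--                 yield nr, nc
-- ===== Notes on version B (the rewrite author's own statement) =====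
-- stated objective: alternative
-- what changed: B scans every cell of the 14x14 board in row-major order and keeps the cells whose Chebyshev distance max(abs(nr-r), abs(nc-c)) to (r, c) is exactly 1, instead of generating the nine (dr, dc) offsets and bounds-testing each candidate; correctness follows because the king-move neighbors are exactly the board cells at Chebyshev distance 1, met in the same row-major order.
import Mathlib
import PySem

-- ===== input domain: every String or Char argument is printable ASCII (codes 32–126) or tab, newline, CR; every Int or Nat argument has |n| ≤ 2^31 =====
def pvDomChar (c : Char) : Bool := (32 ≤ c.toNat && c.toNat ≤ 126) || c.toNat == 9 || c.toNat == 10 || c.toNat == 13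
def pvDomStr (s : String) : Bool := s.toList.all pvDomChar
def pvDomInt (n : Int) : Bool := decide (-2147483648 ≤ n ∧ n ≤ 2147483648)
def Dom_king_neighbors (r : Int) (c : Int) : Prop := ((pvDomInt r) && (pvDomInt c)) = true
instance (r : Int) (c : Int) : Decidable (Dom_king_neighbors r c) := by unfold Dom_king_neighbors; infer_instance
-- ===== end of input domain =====

-- B scans the whole 14x14 board row-major and keeps the cells at Chebyshev distance
-- exactly 1 from (r, c), instead of generating the nine offsets and bounds-testing them;
-- same return value, same row-major order (A is a generator; both ports return the yielded list).

-- ===== PORT A =====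
-- literal transliteration of A: two nested loops over the offsets (-1, 0, 1),
-- 'continue' on the (0,0) offset, bounds test on each candidate cell
def king_neighbors (r : Int) (c : Int) : List (Int × Int) :=
  [(-1 : Int), 0, 1].foldl (fun acc dr =>
    [(-1 : Int), 0, 1].foldl (fun acc dc =>
      if dr = 0 ∧ dc = 0 then acc
      else
        let nr := r + dr
        let nc := c + dc
        if 1 ≤ nr ∧ nr ≤ 14 ∧ 1 ≤ nc ∧ nc ≤ 14 then acc ++ [(nr, nc)] else acc)
      acc) []

-- ===== PORT B =====
-- literal transliteration of B: scan all board cells (range(1,15) x range(1,15)),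
-- keep those whose Chebyshev distance max(abs(nr-r), abs(nc-c)) to (r, c) is exactly 1
def king_neighbors_alt (r : Int) (c : Int) : List (Int × Int) :=
  (PySem.List.pyRange 1 15 1).foldl (fun acc nr =>
    (PySem.List.pyRange 1 15 1).foldl (fun acc nc =>
      if max |nr - r| |nc - c| = 1 then acc ++ [(nr, nc)] else acc) acc) []

-- ===== PRECONDITION & SPEC =====
def Spec_king_neighbors (r : Int) (c : Int) (out : List (Int × Int)) : Prop := out = king_neighbors_alt r c
instance (r : Int) (c : Int) (out : List (Int × Int)) : Decidable (Spec_king_neighbors r c out) := by unfold Spec_king_neighbors; infer_instance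

-- ===== CLAIM (what is proved, stated in full; the proofs are below) =====
def Claim_equal_king_neighbors : Prop := ∀ (r : Int) (c : Int), Dom_king_neighbors r c → Spec_king_neighbors r c (king_neighbors r c)

-- ===== LEMMAS AND PROOFS =====

-- when (r, c) is far from the board (some coordinate outside [0, 15]), A yields nothing
lemma a_empty (r c : Int) (h : ¬ (0 ≤ r ∧ r ≤ 15 ∧ 0 ≤ c ∧ c ≤ 15)) :
    king_neighbors r c = [] := by
  unfold king_neighbors
  simp only [List.foldl_cons, List.foldl_nil, Int.reduceNeg, Int.reduceEq, false_and, and_false,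
    and_self, if_true, if_false]
  rw [if_neg (by omega), if_neg (by omega), if_neg (by omega), if_neg (by omega),
    if_neg (by omega), if_neg (by omega), if_neg (by omega), if_neg (by omega)]

-- and B keeps no board cell either: every cell is at Chebyshev distance ≥ 2
lemma alt_empty (r c : Int) (h : ¬ (0 ≤ r ∧ r ≤ 15 ∧ 0 ≤ c ∧ c ≤ 15)) :
    king_neighbors_alt r c = [] := by
  unfold king_neighbors_alt
  refine (PySem.List.foldl_congr_mem' _ _ (fun acc _ => acc) _ ?_).trans
    (PySem.List.foldl_ignore _ _)
  intro nr hnr acc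
  refine (PySem.List.foldl_congr_mem' _ _ (fun acc _ => acc) _ ?_).trans
    (PySem.List.foldl_ignore _ _)
  intro nc hnc acc'
  rw [PySem.List.mem_pyRange_one] at hnr hnc
  rw [if_neg]
  simp only [Int.abs_eq_natAbs]
  omega

set_option maxHeartbeats 4000000 in
theorem king_neighbors_eq_alt (r c : Int) : king_neighbors r c = king_neighbors_alt r c := by
  by_cases h : 0 ≤ r ∧ r ≤ 15 ∧ 0 ≤ c ∧ c ≤ 15
  · obtain ⟨h1, h2, h3, h4⟩ := h
    interval_cases r <;> interval_cases c <;> decide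
  · rw [a_empty r c h, alt_empty r c h]

-- ===== VERDICT (by name: the statement is the Claim_ definition above) =====
theorem king_neighbors_spec : Claim_equal_king_neighbors := by
  intro r c _
  unfold Spec_king_neighbors
  exact king_neighbors_eq_alt r c
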